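-- pv_equiv track=rewrite | github.com/Kafisabah/SONTECHSP | sontechsp/testler/test_turkce_ascii_tablo_isimlendirmesi.py | _cogul_form_kontrolu
-- ===== SOURCE A (Python) =====
-- def _cogul_form_kontrolu(tablo_adi: str) -> bool:
--     """Tablo adının çoğul formda olduğunu kontrol eder"""
--     # Türkçe çoğul ekleri: -lar, -ler, -ari, -eri, -lari, -leri
--     cogul_ekleri = ['lar', 'ler', 'ari', 'eri', 'lari', 'leri']
--
--     # Alt çizgi ile ayrılmış kelimeler için her parçayı kontrol et
--     kelimeler = tablo_adi.split('_')
--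
--     # En az bir kelime çoğul formda olmalı
--     for kelime in kelimeler:
--         for ek in cogul_ekleri:
--             if kelime.endswith(ek):
--                 return True
--
--     # Özel durumlar (compound kelimeler)
--     ozel_durumlar = [
--         'pos_satislar', 'pos_satis_satirlari', 'odeme_kayitlari',
--         'satis_belgeleri', 'satis_belge_satirlari',
--         'eticaret_hesaplari', 'eticaret_siparisleri',
--         'ebelge_cikis_kuyrugu', 'ebelge_durumlari',
--         'kargo_etiketleri', 'kargo_takipleri',
--         'urun_barkodlari', 'stok_bakiyeleri', 'stok_hareketleri',
--         'sadakat_puanlari', 'kullanici_rolleri', 'rol_yetkileri'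
--     ]
--
--     return tablo_adi in ozel_durumlar
-- ===== SOURCE B (Python) =====
-- def _cogul_form_kontrolu(tablo_adi: str) -> bool:
--     """Tablo adının çoğul formda olduğunu kontrol eder.
--
--     Single left-to-right scan: a plural suffix counts exactly when a
--     3-char core ('lar'/'ler'/'ari'/'eri' — 'lari'/'leri' end in 'ari'/'eri')
--     occurs immediately before an underscore or the end of the string.
--     No word list is built; the special-case list stays unchanged."""
--     s = tablo_adi
--     n = len(s)
--     for i in range(n):
--         if s[i:i + 3] in ('lar', 'ler', 'ari', 'eri') and (i + 3 >= n or s[i + 3] == '_'):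
--             return True
--
--     ozel_durumlar = [
--         'pos_satislar', 'pos_satis_satirlari', 'odeme_kayitlari',
--         'satis_belgeleri', 'satis_belge_satirlari',
--         'eticaret_hesaplari', 'eticaret_siparisleri',
--         'ebelge_cikis_kuyrugu', 'ebelge_durumlari',
--         'kargo_etiketleri', 'kargo_takipleri',
--         'urun_barkodlari', 'stok_bakiyeleri', 'stok_hareketleri',
--         'sadakat_puanlari', 'kullanici_rolleri', 'rol_yetkileri'
--     ]
--     return tablo_adi in ozel_durumlar
-- ===== Notes on version B (the rewrite author's own statement) =====
-- stated objective: alternative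
-- what changed: Replaces split('_') plus a nested 6-suffix endswith loop with a single scan of the string that matches one of 4 suffix cores at positions followed by '_' or end-of-string (the 4-char suffixes are absorbed by their 3-char tails); the special-case list is unchanged.
import Mathlib
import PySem

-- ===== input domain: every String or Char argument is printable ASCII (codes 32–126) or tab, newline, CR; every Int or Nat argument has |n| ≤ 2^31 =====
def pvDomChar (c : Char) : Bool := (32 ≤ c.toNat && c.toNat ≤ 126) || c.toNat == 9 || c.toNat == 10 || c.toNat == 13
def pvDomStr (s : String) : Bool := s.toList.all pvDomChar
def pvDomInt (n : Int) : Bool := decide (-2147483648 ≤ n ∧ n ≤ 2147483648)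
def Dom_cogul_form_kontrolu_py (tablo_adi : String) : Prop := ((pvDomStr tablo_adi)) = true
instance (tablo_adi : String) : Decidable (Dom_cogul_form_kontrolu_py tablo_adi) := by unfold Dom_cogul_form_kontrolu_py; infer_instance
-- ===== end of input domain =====

-- B replaces split('_') + nested 6-suffix endswith loop by one scan matching 4 suffix cores at word-end positions; same results, similar cost (objective: alternative).

-- Shared constant: the unchanged special-case list (used verbatim by both Pythons).
def ozel_durumlar_pv : List String :=
  ["pos_satislar", "pos_satis_satirlari", "odeme_kayitlari",
   "satis_belgeleri", "satis_belge_satirlari",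
   "eticaret_hesaplari", "eticaret_siparisleri",
   "ebelge_cikis_kuyrugu", "ebelge_durumlari",
   "kargo_etiketleri", "kargo_takipleri",
   "urun_barkodlari", "stok_bakiyeleri", "stok_hareketleri",
   "sadakat_puanlari", "kullanici_rolleri", "rol_yetkileri"]

-- ===== PORT A =====
-- Literal port of A: split on '_' (the separator is the nonempty literal "_", so
-- Python's split never raises), then the nested for/for with early return True
-- becomes the nested `any`; fallback is membership in the special-case list.
def cogul_form_kontrolu_py (tablo_adi : String) : Bool :=
  let cogul_ekleri : List (List Char) :=
    [['l','a','r'], ['l','e','r'], ['a','r','i'], ['e','r','i'],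
     ['l','a','r','i'], ['l','e','r','i']]
  let kelimeler := PySem.Chars.splitOn tablo_adi.toList ['_']
  if kelimeler.any (fun kelime => cogul_ekleri.any (fun ek => PySem.Chars.endswith kelime ek)) then
    true
  else
    ozel_durumlar_pv.contains tablo_adi

-- ===== PORT B =====
-- Source B's `s[i:i+3] in ('lar','ler','ari','eri')` at position i:
def pvPat3 (a b c : Char) : Bool :=
  (a == 'l' && b == 'a' && c == 'r') || (a == 'l' && b == 'e' && c == 'r') ||
  (a == 'a' && b == 'r' && c == 'i') || (a == 'e' && b == 'r' && c == 'i')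

-- Source B's `i + 3 >= n or s[i+3] == '_'` (rest = the characters after position i+3):
def pvBnd : List Char → Bool
  | [] => true
  | d :: _ => d == '_'

-- the loop body's test at one position (suffix of the string starting at i):
def pvHit : List Char → Bool
  | a :: b :: c :: r => pvPat3 a b c && pvBnd r
  | _ => false

-- Source B's `for i in range(n): if <test>: return True`, one position at a time:
def pvScan : List Char → Bool
  | [] => false
  | c :: cs => pvHit (c :: cs) || pvScan cs

def cogul_form_kontrolu_py_alt (tablo_adi : String) : Bool :=
  if pvScan tablo_adi.toList then true
  else ozel_durumlar_pv.contains tablo_adi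

-- ===== PRECONDITION & SPEC =====
def Spec_cogul_form_kontrolu_py (tablo_adi : String) (out : Bool) : Prop := out = cogul_form_kontrolu_py_alt tablo_adi
instance (tablo_adi : String) (out : Bool) : Decidable (Spec_cogul_form_kontrolu_py tablo_adi out) := by unfold Spec_cogul_form_kontrolu_py; infer_instance

-- ===== CLAIM (what is proved, stated in full; the proofs are below) =====
def Claim_equal_cogul_form_kontrolu_py : Prop := ∀ (tablo_adi : String), Dom_cogul_form_kontrolu_py tablo_adi → Spec_cogul_form_kontrolu_py tablo_adi (cogul_form_kontrolu_py tablo_adi)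

-- ===== LEMMAS AND PROOFS =====

-- Reference splitter: mySplit l = l.split('_') (proved equal to PySem.Chars.splitOn below).
def mySplit : List Char → List (List Char)
  | [] => [[]]
  | c :: cs =>
    if c = '_' then [] :: mySplit cs
    else
      match mySplit cs with
      | [] => [[c]]
      | w :: ws => (c :: w) :: ws

lemma mySplit_ne_nil (l : List Char) : mySplit l ≠ [] := by
  cases l with
  | nil => simp [mySplit]
  | cons c cs =>
    simp only [mySplit]
    split_ifs
    · simp
    · cases h : mySplit cs <;> simp

def consHead (p : List Char) : List (List Char) → List (List Char)
  | [] => [p]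
  | w :: ws => (p ++ w) :: ws

lemma consHead_nil (xs : List (List Char)) (h : xs ≠ []) : consHead [] xs = xs := by
  cases xs with
  | nil => exact absurd rfl h
  | cons w ws => simp [consHead]

lemma splitOn_go_spec : ∀ (fuel : Nat) (l cur : List Char) (acc : List (List Char)),
    l.length < fuel →
    PySem.Chars.splitOn.go ['_'] fuel l cur acc = acc.reverse ++ consHead cur.reverse (mySplit l) := by
  intro fuel
  induction fuel with
  | zero => intro l cur acc h; omega
  | succ fuel ih =>
    intro l cur acc h
    cases l with
    | nil =>
      simp [PySem.Chars.splitOn.go, mySplit, consHead]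
    | cons c rest =>
      by_cases hc : c = '_'
      · subst hc
        have hp : List.isPrefixOf ['_'] ('_' :: rest) = true := by
          simp [List.isPrefixOf]
        rw [PySem.Chars.splitOn.go]
        simp only [hp, if_true, List.length_cons, List.length_nil, Nat.zero_add,
          List.drop_succ_cons, List.drop_zero]
        rw [ih rest [] (cur.reverse :: acc) (by simpa using Nat.lt_of_succ_lt_succ h)]
        rw [List.reverse_nil, consHead_nil _ (mySplit_ne_nil rest)]
        simp [mySplit, consHead]
      · have hp : List.isPrefixOf ['_'] (c :: rest) = false := by
          simp [List.isPrefixOf]; exact fun h' => hc h'.symm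
        rw [PySem.Chars.splitOn.go]
        simp only [hp]
        rw [ih rest (c :: cur) acc (by simpa using Nat.lt_of_succ_lt_succ h)]
        simp only [mySplit, hc, if_false]
        cases hm : mySplit rest with
        | nil => exact absurd hm (mySplit_ne_nil rest)
        | cons w ws => simp [consHead, List.reverse_cons]

lemma splitOn_eq_mySplit (l : List Char) :
    PySem.Chars.splitOn l ['_'] = mySplit l := by
  rw [PySem.Chars.splitOn, splitOn_go_spec (l.length + 1) l [] [] (by omega)]
  simp [consHead_nil _ (mySplit_ne_nil l)]

-- A's per-word 6-suffix endswith test, seen from the reversed word.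
def pvHitRev : List Char → Bool
  | p :: q :: r :: _ => pvPat3 r q p
  | _ => false

lemma endsAny6_eq_hitRev (w : List Char) :
    ([['l','a','r'], ['l','e','r'], ['a','r','i'], ['e','r','i'],
      ['l','a','r','i'], ['l','e','r','i']] : List (List Char)).any
        (fun ek => PySem.Chars.endswith w ek) = pvHitRev w.reverse := by
  have he : ∀ p : List Char, PySem.Chars.endswith w p = p.reverse.isPrefixOf w.reverse := by
    intro p; rfl
  simp only [List.any_cons, List.any_nil, he]
  generalize w.reverse = r
  match r with
  | [] => simp [List.isPrefixOf, pvHitRev]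
  | [x] => simp [List.isPrefixOf, pvHitRev]
  | [x, y] => simp [List.isPrefixOf, pvHitRev]
  | [x, y, z] =>
    rw [Bool.eq_iff_iff]
    simp [List.isPrefixOf, pvHitRev, pvPat3]
    constructor
    · rintro (⟨rfl,rfl,rfl⟩|⟨rfl,rfl,rfl⟩|⟨rfl,rfl,rfl⟩|⟨rfl,rfl,rfl⟩) <;> tauto
    · rintro (((⟨⟨rfl,rfl⟩,rfl⟩|⟨⟨rfl,rfl⟩,rfl⟩)|⟨⟨rfl,rfl⟩,rfl⟩)|⟨⟨rfl,rfl⟩,rfl⟩) <;> tauto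
  | x :: y :: z :: u :: t =>
    rw [Bool.eq_iff_iff]
    simp [List.isPrefixOf, pvHitRev, pvPat3]
    constructor
    · rintro (⟨rfl,rfl,rfl⟩|⟨rfl,rfl,rfl⟩|⟨rfl,rfl,rfl⟩|⟨rfl,rfl,rfl⟩|⟨rfl,rfl,rfl,rfl⟩|⟨rfl,rfl,rfl,rfl⟩) <;> tauto
    · rintro (((⟨⟨rfl,rfl⟩,rfl⟩|⟨⟨rfl,rfl⟩,rfl⟩)|⟨⟨rfl,rfl⟩,rfl⟩)|⟨⟨rfl,rfl⟩,rfl⟩) <;> tauto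

lemma hitRev_append (l t : List Char) (h : 3 ≤ l.length) :
    pvHitRev (l ++ t) = pvHitRev l := by
  match l with
  | p :: q :: r :: rest => simp [pvHitRev]
  | [] | [_] | [_, _] => simp at h

-- the key per-word identity: prepending c to the first word vs testing at position 0
lemma ends_cons (c : Char) (w rest : List Char)
    (hw : ∀ ch ∈ w, ch ≠ '_')
    (hr : rest = [] ∨ ∃ t, rest = '_' :: t) :
    pvHitRev ((c :: w).reverse) = (pvHit (c :: (w ++ rest)) || pvHitRev w.reverse) := by
  match w with
  | [] =>
    have h0 : pvHit (c :: rest) = false := by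
      rcases hr with rfl | ⟨t, rfl⟩
      · rfl
      · cases t <;> simp [pvHit, pvPat3]
    simp [pvHitRev, h0]
  | [x] =>
    have h0 : pvHit (c :: x :: rest) = false := by
      rcases hr with rfl | ⟨t, rfl⟩
      · rfl
      · simp [pvHit, pvPat3]
    simp [pvHitRev, h0]
  | [x, y] =>
    have hb : pvBnd rest = true := by
      rcases hr with rfl | ⟨t, rfl⟩ <;> simp [pvBnd]
    simp [pvHitRev, pvHit, hb]
  | x :: y :: z :: w' =>
    have hz : z ≠ '_' := hw z (by simp)
    have h1 : pvHit (c :: x :: y :: z :: (w' ++ rest)) = false := by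
      simp [pvHit, pvBnd, hz]
    have h2 : pvHitRev ((c :: x :: y :: z :: w').reverse)
        = pvHitRev ((x :: y :: z :: w').reverse) := by
      rw [List.reverse_cons]
      exact hitRev_append _ _ (by simp)
    rw [h2]
    simp only [List.cons_append]
    rw [h1, Bool.false_or]

lemma pvHit_underscore (cs : List Char) : pvHit ('_' :: cs) = false := by
  match cs with
  | [] => rfl
  | [b] => rfl
  | b :: c :: r => simp [pvHit, pvPat3]

lemma mySplit_structure : ∀ cs : List Char, ∃ w ws rest,
    mySplit cs = w :: ws ∧ cs = w ++ rest ∧ (∀ ch ∈ w, ch ≠ '_') ∧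
    (rest = [] ∨ ∃ t, rest = '_' :: t) := by
  intro cs
  induction cs with
  | nil => exact ⟨[], [], [], by simp [mySplit]⟩
  | cons c cs ih =>
    by_cases hc : c = '_'
    · subst hc
      exact ⟨[], mySplit cs, '_' :: cs, by simp [mySplit], rfl, by simp, Or.inr ⟨cs, rfl⟩⟩
    · obtain ⟨w, ws, rest, hm, hcs, hw, hr⟩ := ih
      refine ⟨c :: w, ws, rest, ?_, by simp [hcs], ?_, hr⟩
      · simp [mySplit, hc, hm]
      · intro ch hch
        rcases List.mem_cons.mp hch with rfl | h
        · exact hc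
        · exact hw ch h

-- the main loop correspondence
lemma main_scan (l : List Char) :
    (mySplit l).any (fun w => pvHitRev w.reverse) = pvScan l := by
  induction l with
  | nil => rfl
  | cons c cs ih =>
    by_cases hc : c = '_'
    · subst hc
      simp only [mySplit, pvScan, pvHit_underscore, Bool.false_or]
      simpa [pvHitRev] using ih
    · obtain ⟨w, ws, rest, hm, hcs, hw, hr⟩ := mySplit_structure cs
      have hsplit : mySplit (c :: cs) = (c :: w) :: ws := by
        simp [mySplit, hc, hm]
      rw [hsplit, List.any_cons, ends_cons c w rest hw hr]
      rw [pvScan, ← hcs, ← ih, hm, List.any_cons]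
      simp [Bool.or_assoc]

theorem cogul_form_kontrolu_py_spec : Claim_equal_cogul_form_kontrolu_py := by
  intro tablo_adi _
  unfold Spec_cogul_form_kontrolu_py cogul_form_kontrolu_py cogul_form_kontrolu_py_alt
  simp only [splitOn_eq_mySplit]
  have h1 : (mySplit tablo_adi.toList).any
      (fun kelime => ([['l','a','r'], ['l','e','r'], ['a','r','i'], ['e','r','i'],
        ['l','a','r','i'], ['l','e','r','i']] : List (List Char)).any
          (fun ek => PySem.Chars.endswith kelime ek)) = pvScan tablo_adi.toList := by
    simp only [endsAny6_eq_hitRev]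
    exact main_scan _
  rw [h1]
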